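-- pv_equiv track=rewrite | github.com/TorchedVIP/Circle_Game | main.py | all_legal_moves
-- ===== SOURCE A (Python) =====
-- def all_legal_moves(rows):
--     moves = []
--     for row_number, row in rows.items():
--         start_index = None
--         for index, value in enumerate(row + [1]):
--             if value == 0 and start_index is None:
--                 start_index = index
--             elif value == 1 and start_index is not None:
--                 for begin in range(start_index, index):
--                     for end in range(begin, index):
--                         positions = list(range(begin + 1, end + 2))
--                         moves.append((row_number, positions))
--                 start_index = None
--     return moves
-- ===== SOURCE B (Python) =====
-- def zero_runs(row, offset):
--     # recursive run extraction: jump to the first 0, cut the run at the next 1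
--     if 0 not in row:
--         return []
--     i = row.index(0)
--     rest = row[i:]
--     j = rest.index(1) if 1 in rest else len(rest)
--     return [(offset + i, offset + i + j)] + zero_runs(rest[j + 1:], offset + i + j + 1)
--
--
-- def all_legal_moves(rows):
--     moves = []
--     for row_number, row in rows.items():
--         for s, e in zero_runs(row, 0):
--             for begin in range(s, e):
--                 for end in range(begin, e):
--                     moves.append((row_number, list(range(begin + 1, end + 2))))
--     return moves
-- ===== Notes on version B (the rewrite author's own statement) =====
-- stated objective: alternative
-- what changed: Replaces A's enumerate-with-flag state machine over the sentinel-extended row by a recursive run extractor that jumps to the first zero and cuts the run at the next one (via index and slicing), then emits the moves per collected run in a second pass.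
import Mathlib
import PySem

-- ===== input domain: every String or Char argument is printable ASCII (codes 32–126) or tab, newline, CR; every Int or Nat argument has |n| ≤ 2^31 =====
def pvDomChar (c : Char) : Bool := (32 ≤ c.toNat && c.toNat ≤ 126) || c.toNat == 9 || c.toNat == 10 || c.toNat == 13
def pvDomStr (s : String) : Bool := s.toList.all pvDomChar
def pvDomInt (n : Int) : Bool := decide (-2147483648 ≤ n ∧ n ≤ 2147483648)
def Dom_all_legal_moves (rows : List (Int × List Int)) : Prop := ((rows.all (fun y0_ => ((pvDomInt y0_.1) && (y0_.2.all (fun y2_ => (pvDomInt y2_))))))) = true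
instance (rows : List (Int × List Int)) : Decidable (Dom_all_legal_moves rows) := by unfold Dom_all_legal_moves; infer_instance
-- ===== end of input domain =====

-- B replaces A's enumerate-with-flag scan by a recursive zero-run extractor
-- (jump to the first 0, cut at the next 1 via index/slicing) plus a second emission pass;
-- alternative decomposition, same cost.


-- ===== PORT A =====
-- literal transliteration: fold over the dict's items; inner fold over enumerate(row + [1])
-- carrying (moves, start_index); the nested begin/end loops append to moves.
def all_legal_moves (rows : List (Int × List Int)) : List (Int × List Int) :=
  (rows.foldl (fun moves rr =>
    ((PySem.List.enumerate (rr.2 ++ [1])).foldl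
      (fun (st : List (Int × List Int) × Option Int) iv =>
        if iv.2 = 0 ∧ st.2 = none then (st.1, some iv.1)
        else if iv.2 = 1 ∧ st.2 ≠ none then
          ((PySem.List.pyRange (st.2.getD 0) iv.1 1).foldl (fun ms b =>
            (PySem.List.pyRange b iv.1 1).foldl (fun ms2 e =>
              ms2 ++ [(rr.1, PySem.List.pyRange (b + 1) (e + 2) 1)]) ms) st.1, none)
        else st)
      (moves, none)).1) [])

-- ===== PORT B =====
-- helper of Source B: recursive zero-run extraction.  '0 not in row' / 'row.index(0)' via index?
-- (none iff not a member); 'row[i:]' via PySem.List.slice.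
def zero_runs (row : List Int) (offset : Int) : List (Int × Int) :=
  match h : PySem.List.index? row (0 : Int) with
  | none => []
  | some i =>
    let rest := PySem.List.slice row (some (i : Int)) none
    let j : Nat :=
      match PySem.List.index? rest (1 : Int) with
      | some j => j
      | none => rest.length
    [((offset + (i : Int)), (offset + (i : Int) + (j : Int)))] ++
      zero_runs (PySem.List.slice rest (some ((j : Nat) + 1 : Int)) none) (offset + (i : Int) + (j : Int) + 1)
  termination_by row.length
  decreasing_by
    have : ∃ (hk : i < row.length), row[i] = 0 ∧ ∀ l (hl : l < i), row[l] ≠ 0 :=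
      PySem.List.getElem_of_index?_eq_some h
    obtain ⟨hk, -, -⟩ := this
    have e1 : PySem.List.slice row (some (i : Int)) none = row.drop i :=
      PySem.List.slice_from_natCast row i
    have e2 : ∀ (xs : List Int) (m : Nat), PySem.List.slice xs (some ((m : Nat) + 1 : Int)) none = xs.drop (m + 1) := by
      intro xs m
      have := PySem.List.slice_from_natCast xs (m + 1)
      simpa using this
    simp [e1, e2, List.length_drop]
    omega

def all_legal_moves_alt (rows : List (Int × List Int)) : List (Int × List Int) :=
  rows.foldl (fun moves rr =>
    (zero_runs rr.2 0).foldl (fun ms se =>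
      (PySem.List.pyRange se.1 se.2 1).foldl (fun ms1 b =>
        (PySem.List.pyRange b se.2 1).foldl (fun ms2 e =>
          ms2 ++ [(rr.1, PySem.List.pyRange (b + 1) (e + 2) 1)]) ms1) ms) moves) []

-- ===== PRECONDITION & SPEC =====
def Spec_all_legal_moves (rows : List (Int × List Int)) (out : List (Int × List Int)) : Prop := out = all_legal_moves_alt rows
instance (rows : List (Int × List Int)) (out : List (Int × List Int)) : Decidable (Spec_all_legal_moves rows out) := by unfold Spec_all_legal_moves; infer_instance

-- ===== CLAIM (what is proved, stated in full; the proofs are below) =====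
def Claim_equal_all_legal_moves : Prop := ∀ (rows : List (Int × List Int)), Dom_all_legal_moves rows → Spec_all_legal_moves rows (all_legal_moves rows)

-- ===== LEMMAS AND PROOFS =====

-- the moves emitted for one run (s, e) of row rn
def pvEmit (rn : Int) (s e : Int) : List (Int × List Int) :=
  (PySem.List.pyRange s e 1).flatMap (fun b =>
    (PySem.List.pyRange b e 1).map (fun en => (rn, PySem.List.pyRange (b + 1) (en + 2) 1)))

theorem pvEmit_fold (rn : Int) (s e : Int) (ms : List (Int × List Int)) :
    (PySem.List.pyRange s e 1).foldl (fun ms1 b =>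
      (PySem.List.pyRange b e 1).foldl (fun ms2 en =>
        ms2 ++ [(rn, PySem.List.pyRange (b + 1) (en + 2) 1)]) ms1) ms
    = ms ++ pvEmit rn s e := by
  simp only [PySem.List.foldl_append_singleton_eq_map]
  exact PySem.List.foldl_append_eq_flatMap _ _ _

-- the runs A's state machine closes, as a recursion (sentinel 1 folded in: base case with open run)
def pvRunsA (row : List Int) (k : Int) (si : Option Int) : List (Int × Int) :=
  match row, si with
  | [], none => []
  | [], some s => [(s, k)]
  | v :: r, none => if v = 0 then pvRunsA r (k + 1) (some k) else pvRunsA r (k + 1) none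
  | v :: r, some s => if v = 1 then (s, k) :: pvRunsA r (k + 1) none else pvRunsA r (k + 1) (some s)

theorem pvA_inner (rn : Int) (row : List Int) (k : Int) (si : Option Int) (ms : List (Int × List Int)) :
    ((PySem.List.enumerate (row ++ [1]) k).foldl
      (fun (st : List (Int × List Int) × Option Int) iv =>
        if iv.2 = 0 ∧ st.2 = none then (st.1, some iv.1)
        else if iv.2 = 1 ∧ st.2 ≠ none then
          ((PySem.List.pyRange (st.2.getD 0) iv.1 1).foldl (fun ms1 b =>
            (PySem.List.pyRange b iv.1 1).foldl (fun ms2 e =>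
              ms2 ++ [(rn, PySem.List.pyRange (b + 1) (e + 2) 1)]) ms1) st.1, none)
        else st)
      (ms, si)).1
    = ms ++ (pvRunsA row k si).flatMap (fun se => pvEmit rn se.1 se.2) := by
  induction row generalizing k si ms with
  | nil =>
    match si with
    | none =>
      rw [List.nil_append, PySem.List.enumerate_cons, PySem.List.enumerate_nil]
      have hc0 : ¬ ((1 : Int) = 0 ∧ (none : Option Int) = none) := by simp
      have hc1 : ¬ ((1 : Int) = 1 ∧ (none : Option Int) ≠ none) := by simp
      rw [List.foldl_cons, if_neg hc0, if_neg hc1, List.foldl_nil]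
      simp [pvRunsA]
    | some s =>
      rw [List.nil_append, PySem.List.enumerate_cons, PySem.List.enumerate_nil]
      have hc0 : ¬ ((1 : Int) = 0 ∧ (some s : Option Int) = none) := by simp
      have hc1 : ((1 : Int) = 1 ∧ (some s : Option Int) ≠ none) := by simp
      rw [List.foldl_cons, if_neg hc0, if_pos hc1, List.foldl_nil]
      simp only [Option.getD_some]
      rw [pvEmit_fold]
      simp [pvRunsA]
  | cons v r ih =>
    rw [List.cons_append, PySem.List.enumerate_cons, List.foldl_cons]
    match si with
    | none =>
      by_cases h0 : v = 0
      · have hc0 : (v = 0 ∧ (none : Option Int) = none) := by simp [h0]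
        rw [if_pos hc0, ih (k + 1) (some k) ms]
        simp [pvRunsA, h0]
      · have hc0 : ¬ (v = 0 ∧ (none : Option Int) = none) := by simp [h0]
        have hc1 : ¬ (v = 1 ∧ (none : Option Int) ≠ none) := by simp
        rw [if_neg hc0, if_neg hc1, ih (k + 1) none ms]
        simp [pvRunsA, h0]
    | some s =>
      by_cases h1 : v = 1
      · have hc0 : ¬ (v = 0 ∧ (some s : Option Int) = none) := by simp
        have hc1 : (v = 1 ∧ (some s : Option Int) ≠ none) := by simp [h1]
        rw [if_neg hc0, if_pos hc1]
        simp only [Option.getD_some]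
        rw [pvEmit_fold, ih (k + 1) none (ms ++ pvEmit rn s k)]
        simp [pvRunsA, h1]
      · have hc0 : ¬ (v = 0 ∧ (some s : Option Int) = none) := by simp
        have hc1 : ¬ (v = 1 ∧ (some s : Option Int) ≠ none) := by simp [h1]
        rw [if_neg hc0, if_neg hc1, ih (k + 1) (some s) ms]
        simp [pvRunsA, h1]

-- skipping a closed-state prefix without zeros
theorem pvRunsA_skip_closed (pre : List Int) (t : List Int) (k : Int)
    (h : (0 : Int) ∉ pre) :
    pvRunsA (pre ++ t) k none = pvRunsA t (k + pre.length) none := by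
  induction pre generalizing k with
  | nil => simp
  | cons x xs ih =>
    have hx : x ≠ 0 := by intro hx; exact h (by simp [hx])
    have hxs : (0 : Int) ∉ xs := fun hm => h (by simp [hm])
    rw [List.cons_append]
    simp only [pvRunsA, if_neg hx]
    rw [ih _ hxs]
    congr 1
    push_cast [List.length_cons]
    ring

-- skipping an open-state prefix without ones
theorem pvRunsA_skip_open (pre : List Int) (t : List Int) (k s : Int)
    (h : (1 : Int) ∉ pre) :
    pvRunsA (pre ++ t) k (some s) = pvRunsA t (k + pre.length) (some s) := by
  induction pre generalizing k with
  | nil => simp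
  | cons x xs ih =>
    have hx : x ≠ 1 := by intro hx; exact h (by simp [hx])
    have hxs : (1 : Int) ∉ xs := fun hm => h (by simp [hm])
    rw [List.cons_append]
    simp only [pvRunsA, if_neg hx]
    rw [ih _ hxs]
    congr 1
    push_cast [List.length_cons]
    ring

-- the central equivalence: state machine runs = recursive zero-run extraction
theorem zero_runs_none (row : List Int) (k : Int)
    (h : PySem.List.index? row (0 : Int) = none) : zero_runs row k = [] := by
  rw [zero_runs]
  split
  · rfl
  · rename_i i heq
    rw [h] at heq
    exact absurd heq (by simp)

theorem zero_runs_some_none (row : List Int) (k : Int) (i : Nat)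
    (h0 : PySem.List.index? row (0 : Int) = some i)
    (h1 : PySem.List.index? (PySem.List.slice row (some (i : Int)) none) (1 : Int) = none) :
    zero_runs row k = [(k + (i : Int), k + (i : Int) + ((PySem.List.slice row (some (i : Int)) none).length : Int))] := by
  rw [zero_runs]
  split
  · rename_i heq
    rw [h0] at heq
    exact absurd heq (by simp)
  · rename_i i' heq
    rw [h0] at heq
    injection heq with heq
    subst heq
    dsimp only
    rw [h1]
    have hempty : PySem.List.slice (PySem.List.slice row (some (i : Int)) none)
        (some ((((PySem.List.slice row (some (i : Int)) none).length : Nat) : Int) + 1)) none = [] := by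
      have h2 := PySem.List.slice_from_natCast (PySem.List.slice row (some (i : Int)) none)
        ((PySem.List.slice row (some (i : Int)) none).length + 1)
      push_cast at h2 ⊢
      rw [h2]
      simp
      omega
    rw [hempty, zero_runs_none [] _ (by simp [PySem.List.index?])]
    simp

theorem zero_runs_some_some (row : List Int) (k : Int) (i j : Nat)
    (h0 : PySem.List.index? row (0 : Int) = some i)
    (h1 : PySem.List.index? (PySem.List.slice row (some (i : Int)) none) (1 : Int) = some j) :
    zero_runs row k = (k + (i : Int), k + (i : Int) + (j : Int)) ::
      zero_runs (PySem.List.slice (PySem.List.slice row (some (i : Int)) none) (some ((j : Int) + 1)) none)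
        (k + (i : Int) + (j : Int) + 1) := by
  rw [zero_runs]
  split
  · rename_i heq
    rw [h0] at heq
    exact absurd heq (by simp)
  · rename_i i' heq
    rw [h0] at heq
    injection heq with heq
    subst heq
    dsimp only
    rw [h1]
    push_cast
    simp

theorem pvRuns_eq (row : List Int) (k : Int) :
    pvRunsA row k none = zero_runs row k := by
  induction hn : row.length using Nat.strong_induction_on generalizing row k with
  | _ n ih =>
  match hidx : PySem.List.index? row (0 : Int) with
  | none =>
    have h0 : (0 : Int) ∉ row := (PySem.List.index?_eq_none_iff _ _).mp hidx
    have hskip := pvRunsA_skip_closed row [] k h0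
    simp [pvRunsA] at hskip
    rw [zero_runs_none row k hidx, hskip]
  | some i =>
    obtain ⟨pre, suf, hrow, hlen, hnotin⟩ := (PySem.List.index?_eq_some_iff _ _ _).mp hidx
    have hrest : PySem.List.slice row (some (i : Int)) none = (0 : Int) :: suf := by
      rw [PySem.List.slice_from_natCast, hrow, ← hlen, List.drop_left' rfl]
    have hA1 : pvRunsA row k none = pvRunsA ((0 : Int) :: suf) (k + i) none := by
      rw [hrow, pvRunsA_skip_closed pre _ k hnotin, hlen]
    have hA2 : pvRunsA ((0 : Int) :: suf) (k + i) none = pvRunsA suf (k + i + 1) (some (k + i)) := by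
      simp [pvRunsA]
    match hjdx : PySem.List.index? ((0 : Int) :: suf) (1 : Int) with
    | none =>
      have h1 : (1 : Int) ∉ (0 : Int) :: suf := (PySem.List.index?_eq_none_iff _ _).mp hjdx
      have h1s : (1 : Int) ∉ suf := fun hm => h1 (by simp [hm])
      have hskip := pvRunsA_skip_open suf [] (k + i + 1) (k + i) h1s
      simp [pvRunsA] at hskip
      rw [hA1, hA2, hskip, zero_runs_some_none row k i hidx (by rw [hrest]; exact hjdx), hrest]
      simp
      ring
    | some j =>
      obtain ⟨pre2, suf2, hrest2, hlen2, hnotin2⟩ := (PySem.List.index?_eq_some_iff _ _ _).mp hjdx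
      match pre2, hrest2 with
      | [], hh => simp at hh
      | (p :: pre2'), hh =>
        have hsuf : suf = pre2' ++ (1 : Int) :: suf2 := by simpa using congrArg List.tail hh
        have hnp : (1 : Int) ∉ pre2' := fun hm => hnotin2 (by simp [hm])
        have hj : j = pre2'.length + 1 := by simp [← hlen2]
        have hdrop : PySem.List.slice ((0 : Int) :: suf) (some ((j : Int) + 1)) none = suf2 := by
          have h2 := PySem.List.slice_from_natCast ((0 : Int) :: suf) (j + 1)
          push_cast at h2 ⊢
          rw [h2, hsuf, hj]
          show List.drop (pre2'.length + 2) ((0 : Int) :: (pre2' ++ 1 :: suf2)) = suf2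
          rw [List.drop_succ_cons]
          have hsplit : pre2' ++ (1 : Int) :: suf2 = (pre2' ++ [1]) ++ suf2 := by simp
          rw [hsplit, List.drop_left' (by simp)]
        rw [zero_runs_some_some row k i j hidx (by rw [hrest]; exact hjdx), hrest, hdrop]
        have hskip := pvRunsA_skip_open pre2' ((1 : Int) :: suf2) (k + i + 1) (k + i) hnp
        have hclose : pvRunsA ((1 : Int) :: suf2) (k + i + 1 + pre2'.length) (some (k + i))
            = (k + i, k + i + 1 + pre2'.length) :: pvRunsA suf2 (k + i + 1 + pre2'.length + 1) none := by
          simp [pvRunsA]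
        have hrec : pvRunsA suf2 (k + i + 1 + pre2'.length + 1) none = zero_runs suf2 (k + i + 1 + pre2'.length + 1) := by
          apply ih suf2.length _ suf2 _ rfl
          subst hn
          rw [hrow, hsuf]
          simp
          omega
        rw [hA1, hA2, hsuf, hskip, hclose, hrec]
        have he1 : k + (i : Int) + (j : Int) = k + i + 1 + (pre2'.length : Int) := by rw [hj]; push_cast; ring
        have he2 : k + (i : Int) + (j : Int) + 1 = k + i + 1 + (pre2'.length : Int) + 1 := by rw [hj]; push_cast; ring
        rw [he1]

-- B's per-row loop flattens to pvEmit over its runs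
theorem pvB_row (rn : Int) (runs : List (Int × Int)) (ms : List (Int × List Int)) :
    runs.foldl (fun ms se =>
      (PySem.List.pyRange se.1 se.2 1).foldl (fun ms1 b =>
        (PySem.List.pyRange b se.2 1).foldl (fun ms2 e =>
          ms2 ++ [(rn, PySem.List.pyRange (b + 1) (e + 2) 1)]) ms1) ms) ms
    = ms ++ runs.flatMap (fun se => pvEmit rn se.1 se.2) := by
  simp only [pvEmit_fold]
  exact PySem.List.foldl_append_eq_flatMap _ _ _

theorem pv_main (rows : List (Int × List Int)) (ms : List (Int × List Int)) :
    rows.foldl (fun moves rr =>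
      ((PySem.List.enumerate (rr.2 ++ [1])).foldl
        (fun (st : List (Int × List Int) × Option Int) iv =>
          if iv.2 = 0 ∧ st.2 = none then (st.1, some iv.1)
          else if iv.2 = 1 ∧ st.2 ≠ none then
            ((PySem.List.pyRange (st.2.getD 0) iv.1 1).foldl (fun ms1 b =>
              (PySem.List.pyRange b iv.1 1).foldl (fun ms2 e =>
                ms2 ++ [(rr.1, PySem.List.pyRange (b + 1) (e + 2) 1)]) ms1) st.1, none)
          else st)
        (moves, none)).1) ms
    = rows.foldl (fun moves rr =>
        (zero_runs rr.2 0).foldl (fun ms se =>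
          (PySem.List.pyRange se.1 se.2 1).foldl (fun ms1 b =>
            (PySem.List.pyRange b se.2 1).foldl (fun ms2 e =>
              ms2 ++ [(rr.1, PySem.List.pyRange (b + 1) (e + 2) 1)]) ms1) ms) moves) ms := by
  induction rows generalizing ms with
  | nil => rfl
  | cons rr rest ih =>
    simp only [List.foldl_cons]
    rw [pvA_inner rr.1 rr.2 0 none ms, pvRuns_eq, pvB_row]
    exact ih _

-- ===== VERDICT (by name: the statement is the Claim_ definition above) =====
theorem all_legal_moves_spec : Claim_equal_all_legal_moves := by
  intro rows _
  unfold Spec_all_legal_moves all_legal_moves all_legal_moves_alt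
  exact pv_main rows []
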